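-- pv_equiv track=rewrite | github.com/MDoerner/AdventOfCode2019 | AdventOfCode20191204_2.py | has_isolated_double
-- ===== SOURCE A (Python) =====
-- def has_isolated_double(digit_list):
--     length_of_list = len(digit_list)
--     for index in range(length_of_list - 1):
--         if digit_list[index + 1] == digit_list[index]:
--             if (index == 0 or digit_list[index - 1] != digit_list[index]) and \
--                 (index + 2 == length_of_list or digit_list[index + 2] != digit_list[index]):
--                 return True
--     return False
-- ===== SOURCE B (Python) =====
-- def has_isolated_double(digit_list):
--     # Run-length scan: walk maximal runs of equal digits; True iff some run has length exactly 2.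
--     i, n = 0, len(digit_list)
--     while i < n:
--         j = i
--         while j < n and digit_list[j] == digit_list[i]:
--             j += 1
--         if j - i == 2:
--             return True
--         i = j
--     return False
-- ===== Notes on version B (the rewrite author's own statement) =====
-- stated objective: alternative
-- what changed: B partitions the list into maximal runs of equal digits (groupby-style run-length scan) and reports whether some run has length exactly 2, instead of A's per-index neighbour comparisons with boundary guards.
import Mathlib
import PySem

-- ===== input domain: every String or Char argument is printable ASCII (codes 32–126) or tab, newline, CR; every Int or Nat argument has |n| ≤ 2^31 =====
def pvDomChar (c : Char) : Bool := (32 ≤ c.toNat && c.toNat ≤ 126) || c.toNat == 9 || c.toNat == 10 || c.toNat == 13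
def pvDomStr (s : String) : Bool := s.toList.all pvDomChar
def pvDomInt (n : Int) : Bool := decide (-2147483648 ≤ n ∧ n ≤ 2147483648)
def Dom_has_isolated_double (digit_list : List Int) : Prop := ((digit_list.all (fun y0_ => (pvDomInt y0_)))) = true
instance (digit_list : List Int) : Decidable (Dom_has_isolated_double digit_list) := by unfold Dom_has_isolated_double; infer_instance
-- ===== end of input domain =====

-- B is an alternative same-cost algorithm: a run-length scan over maximal runs instead of
-- per-index neighbour comparisons with boundary guards.

-- ===== PORT A =====
def has_isolated_double (digit_list : List Int) : Bool :=
  let length_of_list := digit_list.length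
  (List.range (length_of_list - 1)).any fun index =>
    (digit_list.getD (index + 1) 0 == digit_list.getD index 0) &&
    (decide (index = 0) || !(digit_list.getD (index - 1) 0 == digit_list.getD index 0)) &&
    (decide (index + 2 = length_of_list) || !(digit_list.getD (index + 2) 0 == digit_list.getD index 0))

-- ===== PORT B =====
-- length of the maximal leading run of elements equal to x, minus one (B's inner while-loop)
def pvRunLen (x : Int) : List Int → Nat
  | [] => 0
  | y :: ys => if y == x then pvRunLen x ys + 1 else 0

-- B's outer loop: the run starting at the head has length pvRunLen x xs + 1; check it, skip it.
def has_isolated_double_alt : List Int → Bool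
  | [] => false
  | x :: xs =>
    let k := pvRunLen x xs
    (k + 1 == 2) || has_isolated_double_alt (xs.drop k)
termination_by l => l.length
decreasing_by exact Nat.lt_succ_of_le (by simp)

-- ===== PRECONDITION & SPEC =====
def Spec_has_isolated_double (digit_list : List Int) (out : Bool) : Prop := out = has_isolated_double_alt digit_list
instance (digit_list : List Int) (out : Bool) : Decidable (Spec_has_isolated_double digit_list out) := by unfold Spec_has_isolated_double; infer_instance

-- ===== CLAIM (what is proved, stated in full; the proofs are below) =====
def Claim_equal_has_isolated_double : Prop := ∀ (digit_list : List Int), Dom_has_isolated_double digit_list → Spec_has_isolated_double digit_list (has_isolated_double digit_list)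

-- ===== LEMMAS AND PROOFS =====

-- Proof bridge: a structural recursion equivalent to A's indexed scan, carrying the previous element.
def gA (prev : Option Int) : List Int → Bool
  | [] => false
  | [_] => false
  | x :: y :: rest =>
    ((y == x) && !(prev == some x) && (rest.isEmpty || !(rest.getD 0 0 == x)))
    || gA (some x) (y :: rest)

-- A's loop body, generalised with the element before the window (none at the start).
def condA (prev : Option Int) (l : List Int) (i : Nat) : Bool :=
  (l.getD (i + 1) 0 == l.getD i 0) &&
  (if i = 0 then !(prev == some (l.getD 0 0)) else !(l.getD (i - 1) 0 == l.getD i 0)) &&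
  (decide (i + 2 = l.length) || !(l.getD (i + 2) 0 == l.getD i 0))

theorem any_congr_fun {α : Type} (l : List α) {f g : α → Bool} (h : ∀ a, f a = g a) :
    l.any f = l.any g := by
  have : f = g := funext h
  rw [this]

theorem A_eq_gA : ∀ (l : List Int) (prev : Option Int),
    (List.range (l.length - 1)).any (condA prev l) = gA prev l := by
  intro l
  induction l with
  | nil => intro prev; rfl
  | cons x xs ih =>
    intro prev
    cases xs with
    | nil => rfl
    | cons y rest =>
      have hlen : (x :: y :: rest).length - 1 = rest.length + 1 := by simp
      rw [hlen, List.range_succ_eq_map, List.any_cons, List.any_map]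
      have h0 : condA prev (x :: y :: rest) 0
          = ((y == x) && !(prev == some x) && (rest.isEmpty || !(rest.getD 0 0 == x))) := by
        cases rest <;> simp [condA]
      have hsh : ∀ j : ℕ, (condA prev (x :: y :: rest) ∘ Nat.succ) j = condA (some x) (y :: rest) j := by
        intro j
        cases j with
        | zero =>
          simp only [Function.comp, condA, Nat.succ_eq_add_one, List.getD_cons_succ,
            List.getD_cons_zero, List.length_cons]
          congr 2
          exact decide_eq_decide.mpr (by omega)
        | succ j' =>
          simp only [Function.comp, condA, Nat.succ_eq_add_one, List.length_cons]
          have h1 : j' + 1 + 1 - 1 = j' + 1 := by omega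
          have h2 : j' + 1 - 1 = j' := by omega
          rw [h1, h2]
          simp only [if_neg (Nat.succ_ne_zero j'), if_neg (Nat.succ_ne_zero (j'+1)),
            List.getD_cons_succ]
          congr 2
          exact decide_eq_decide.mpr (by omega)
      rw [h0, any_congr_fun (List.range rest.length) hsh]
      have hr : rest.length = (y :: rest).length - 1 := by simp
      rw [hr, ih (some x)]
      rfl

-- Once prev equals the head, the window condition at the head is false.
theorem gA_skip (x : Int) (t : List Int) : gA (some x) (x :: t) = gA (some x) t := by
  cases t with
  | nil => rfl
  | cons y ys => simp [gA]

-- gA ignores a whole leading run of prev's value.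
theorem gA_drop_run (u : List Int) (x : Int) :
    gA (some x) u = gA (some x) (u.drop (pvRunLen x u)) := by
  induction u with
  | nil => rfl
  | cons y ys ih =>
    by_cases h : y = x
    · subst h
      rw [pvRunLen, if_pos (by simp), gA_skip, List.drop_succ_cons, ih]
    · rw [pvRunLen, if_neg (by simpa using h), List.drop_zero]

-- After dropping the maximal leading run of x's, the head (if any) differs from x.
theorem head_drop_run (u : List Int) (x h : Int)
    (hh : (u.drop (pvRunLen x u)).head? = some h) : h ≠ x := by
  induction u with
  | nil => simp at hh
  | cons y ys ih =>
    by_cases hyx : y = x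
    · subst hyx
      rw [pvRunLen, if_pos (by simp), List.drop_succ_cons] at hh
      exact ih hh
    · rw [pvRunLen, if_neg (by simpa using hyx), List.drop_zero] at hh
      simp at hh
      rw [← hh]; exact hyx

theorem alt_eq_gA : ∀ (n : Nat) (l : List Int) (prev : Option Int), l.length ≤ n →
    (∀ h : Int, l.head? = some h → prev ≠ some h) →
    has_isolated_double_alt l = gA prev l := by
  intro n
  induction n with
  | zero =>
    intro l prev hl _
    have : l = [] := List.eq_nil_of_length_eq_zero (Nat.le_zero.mp hl)
    subst this; rw [has_isolated_double_alt]; rfl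
  | succ n ih =>
    intro l prev hl hprev
    cases l with
    | nil => rw [has_isolated_double_alt]; rfl
    | cons x xs =>
      have hpx : (prev == some x) = false := by
        have := hprev x (by rfl)
        simpa using this
      cases xs with
      | nil => simp [has_isolated_double_alt, pvRunLen, gA]
      | cons y ys =>
        by_cases hyx : x = y
        · subst hyx
          rw [show has_isolated_double_alt (x :: x :: ys)
              = ((pvRunLen x (x :: ys) + 1 == 2) || has_isolated_double_alt ((x :: ys).drop (pvRunLen x (x :: ys)))) from by rw [has_isolated_double_alt]]
          rw [show pvRunLen x (x :: ys) = pvRunLen x ys + 1 from by rw [pvRunLen, if_pos (by simp)]]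
          rw [List.drop_succ_cons]
          cases hrl : pvRunLen x ys with
          | zero =>
            -- run of length exactly 2
            have hbound : (ys.isEmpty || !(ys.getD 0 0 == x)) = true := by
              cases ys with
              | nil => rfl
              | cons z zs =>
                have : (z == x) = false := by
                  rw [pvRunLen] at hrl
                  by_cases hzx : z = x
                  · rw [if_pos (by simpa using hzx)] at hrl; omega
                  · simpa using hzx
                simp [this]
            simp [gA, hpx]
            left
            cases ys with
            | nil => left; rfl
            | cons z zs =>
              right
              simp only [List.isEmpty_cons, Bool.false_or] at hbound
              simpa using hbound
          | succ m =>
            -- run of length ≥ 3: A's condition fails throughout the run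
            obtain ⟨z, zs, hzs⟩ : ∃ z zs, ys = z :: zs := by
              cases ys with
              | nil => rw [pvRunLen] at hrl; omega
              | cons z zs => exact ⟨z, zs, rfl⟩
            have hz : (z == x) = true := by
              rw [hzs, pvRunLen] at hrl
              by_cases hzx : z = x
              · simpa using hzx
              · rw [if_neg (by simpa using hzx)] at hrl; omega
            have hhead : ((x == x) && !(prev == some x) && ((z::zs).isEmpty || !((z::zs).getD 0 0 == x))) = false := by
              simp [hz]
            rw [show gA prev (x :: x :: ys)
                = (((x == x) && !(prev == some x) && (ys.isEmpty || !(ys.getD 0 0 == x))) || gA (some x) (x :: ys)) from rfl]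
            rw [hzs, hhead, Bool.false_or, gA_skip, ← hzs]
            rw [gA_drop_run ys x]
            have hlen2 : (ys.drop (pvRunLen x ys)).length ≤ n := by
              have hd : (ys.drop (pvRunLen x ys)).length ≤ ys.length := by
                simp [List.length_drop]
              have hy : ys.length + 2 ≤ n + 1 := by simpa using hl
              omega
            have hrec := ih (ys.drop (pvRunLen x ys)) (some x) hlen2
              (by intro h hh hc
                  exact head_drop_run ys x h hh (by injection hc with hc'; exact hc'.symm))
            rw [hrl] at hrec ⊢
            rw [← hrec]
            simp
        · -- run of length 1
          have hyxb : (y == x) = false := by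
            simp only [beq_eq_false_iff_ne, ne_eq]
            intro h; exact hyx h.symm
          rw [show has_isolated_double_alt (x :: y :: ys)
              = ((pvRunLen x (y :: ys) + 1 == 2) || has_isolated_double_alt ((y :: ys).drop (pvRunLen x (y :: ys)))) from by rw [has_isolated_double_alt]]
          rw [show pvRunLen x (y :: ys) = 0 from by rw [pvRunLen, if_neg (by simp [hyxb])]]
          rw [List.drop_zero]
          have hrec := ih (y :: ys) (some x) (by simpa using Nat.le_of_succ_le_succ hl)
            (by intro h hh hc
                have : h = y := by simpa using hh.symm
                subst this
                injection hc with hc'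
                exact hyx hc')
          rw [show gA prev (x :: y :: ys)
              = (((y == x) && !(prev == some x) && (ys.isEmpty || !(ys.getD 0 0 == x))) || gA (some x) (y :: ys)) from rfl]
          rw [hyxb, ← hrec]
          simp

-- A's port equals the generalised scan with prev = none.
theorem A_cond_none (l : List Int) :
    has_isolated_double l = (List.range (l.length - 1)).any (condA none l) := by
  unfold has_isolated_double
  apply any_congr_fun
  intro i
  cases i with
  | zero => simp [condA]
  | succ j => simp [condA]

-- ===== VERDICT (by name: the statement is the Claim_ definition above) =====
theorem has_isolated_double_spec : Claim_equal_has_isolated_double := by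
  intro l _
  unfold Spec_has_isolated_double
  rw [A_cond_none, A_eq_gA]
  exact (alt_eq_gA l.length l none le_rfl (by intro h _ hc; simp at hc)).symm
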